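-- pv_equiv track=rewrite | github.com/christofhaerens/advent_of_code | 2015/day20/puzzle20.py | part_2
-- ===== SOURCE A (Python) =====
-- import math
--
-- def divisorGenerator(n):
--     large_divisors = []
--     for i in range(1, int(math.sqrt(n) + 1)):
--         if n % i == 0:
--             yield i
--             if i * i != n:
--                 large_divisors.append(n / i)
--     for divisor in reversed(large_divisors):
--         yield divisor
--
-- def part_2(high, maxhouse):
--     house = 0
--     visit_count = [0]
--     while True:
--         house += 1
--         visit_count.append(0)
--         elves = list(divisorGenerator(house))
--         visiting = []
--         for e in elves:
--             e = int(e)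
--             if visit_count[e] < maxhouse:
--                 visit_count[e] += 1
--                 visiting.append(e)
--         presents = sum([i * 11 for i in visiting])
--         if presents > high:
--             break
--     return house
-- ===== SOURCE B (Python) =====
-- def part_2(high, maxhouse):
--     house = 0
--     while True:
--         house += 1
--         presents = 0
--         i = 1
--         while i * i <= house:
--             if house % i == 0:
--                 d = house // i
--                 if i * maxhouse >= house:
--                     presents += i
--                 if d != i and d * maxhouse >= house:
--                     presents += d
--             i += 1
--         if 11 * presents > high:
--             return house
-- ===== Notes on version B (the rewrite author's own statement) =====
-- stated objective: simpler
-- what changed: B replaces A's divisor generator (sqrt loop building small/large lists plus a reversed yield) and the cross-house visit_count array by the closed-form visiting condition divisor*maxhouse >= house, summing qualifying divisors directly in one sqrt loop per house with no state between houses.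
import Mathlib
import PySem

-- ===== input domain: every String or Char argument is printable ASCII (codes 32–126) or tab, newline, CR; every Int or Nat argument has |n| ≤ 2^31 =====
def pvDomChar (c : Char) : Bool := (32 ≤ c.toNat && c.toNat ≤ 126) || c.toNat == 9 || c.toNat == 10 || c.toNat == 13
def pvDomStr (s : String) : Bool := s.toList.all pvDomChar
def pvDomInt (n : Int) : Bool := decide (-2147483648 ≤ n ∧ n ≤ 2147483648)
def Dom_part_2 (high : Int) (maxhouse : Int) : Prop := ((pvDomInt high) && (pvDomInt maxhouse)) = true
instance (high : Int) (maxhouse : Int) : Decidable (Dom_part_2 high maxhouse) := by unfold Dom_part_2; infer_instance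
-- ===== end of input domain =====

-- B drops A's divisor-generator and cross-house visit_count array, using the closed-form
-- visiting condition divisor*maxhouse >= house in one sqrt loop per house (objective: simpler).

-- ===== PORT A =====
-- divisorGenerator(n): on the admitted domain (1 ≤ n ≤ 2^31 < 2^53) the float operations
-- math.sqrt(n)+1 and n/i (i a divisor of n) are exact, so they are ported as Nat.sqrt and
-- exact integer division.  Yields: small divisors in range order, then large ones reversed.
def pvDivGen (n : Int) : List Int :=
  let p := (PySem.List.pyRange 1 ((Nat.sqrt n.toNat : Int) + 1) 1).foldl
    (fun (acc : List Int × List Int) i =>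
      if PySem.Int.mod n i = 0 then
        (acc.1 ++ [i], if i * i ≠ n then acc.2 ++ [PySem.Int.floordiv n i] else acc.2)
      else acc) ([], [])
  p.1 ++ p.2.reverse

-- body of A's `for e in elves` loop; state = (visit_count, visiting).
-- the index e is always in range (e ≤ house < len(visit_count)), so visit_count[e] is getD;
-- `e = int(e)` is the exact float→int conversion, a no-op on the ported integers.
def pvElfStep (maxhouse : Int) (acc : List Int × List Int) (e : Int) : List Int × List Int :=
  if acc.1.getD e.toNat 0 < maxhouse then
    (acc.1.set e.toNat (acc.1.getD e.toNat 0 + 1), acc.2 ++ [e])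
  else acc

-- A's `while True` loop; the fuel only totalises it (when maxhouse ≥ 1 or high < 0 the answer
-- is reached before high.toNat + 2 houses; otherwise Python loops forever and both ports,
-- sharing this fuel, return the same default).
def pvLoopA (high maxhouse : Int) : Nat → Int → List Int → Int
  | 0, _, _ => 0
  | fuel+1, house, vc =>
      let house := house + 1
      let vc := vc ++ [0]
      let r := (pvDivGen house).foldl (pvElfStep maxhouse) (vc, [])
      let presents := (r.2.map (fun i => i * 11)).sum
      if presents > high then house else pvLoopA high maxhouse fuel house r.1

def part_2 (high : Int) (maxhouse : Int) : Int :=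
  pvLoopA high maxhouse (high.toNat + 2) 0 [0]

-- ===== PORT B =====
-- B's inner `while i * i <= house` loop, accumulating qualifying divisors i and house//i.
def pvSumDiv (house maxhouse : Int) (i : Int) : Int :=
  if _h : i * i ≤ house then
    (if house % i = 0 then
       (if i * maxhouse ≥ house then i else 0) +
       (if house / i ≠ i ∧ (house / i) * maxhouse ≥ house then house / i else 0)
     else 0) + pvSumDiv house maxhouse (i + 1)
  else 0
termination_by (house + 1 - i).toNat
decreasing_by
  have hi : i ≤ i * i := by nlinarith [mul_self_nonneg (i - 1)]
  omega

-- B's `while True` loop (same totalising fuel as A's port).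
def pvLoopB (high maxhouse : Int) : Nat → Int → Int
  | 0, _ => 0
  | fuel+1, house =>
      let house := house + 1
      if 11 * pvSumDiv house maxhouse 1 > high then house
      else pvLoopB high maxhouse fuel house

def part_2_alt (high : Int) (maxhouse : Int) : Int :=
  pvLoopB high maxhouse (high.toNat + 2) 0

-- ===== PRECONDITION & SPEC =====
def Spec_part_2 (high : Int) (maxhouse : Int) (out : Int) : Prop := out = part_2_alt high maxhouse
instance (high : Int) (maxhouse : Int) (out : Int) : Decidable (Spec_part_2 high maxhouse out) := by unfold Spec_part_2; infer_instance

-- ===== CLAIM (what is proved, stated in full; the proofs are below) =====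
def Claim_equal_part_2 : Prop := ∀ (high : Int) (maxhouse : Int), Dom_part_2 high maxhouse → Spec_part_2 high maxhouse (part_2 high maxhouse)

-- ===== LEMMAS AND PROOFS =====

-- small divisors / large divisors contributed by one index i of the sqrt range
def pvSm (n i : Int) : List Int := if PySem.Int.mod n i = 0 then [i] else []
def pvLg (n i : Int) : List Int :=
  if PySem.Int.mod n i = 0 ∧ i * i ≠ n then [PySem.Int.floordiv n i] else []
def pvR (n : Int) : List Int := PySem.List.pyRange 1 ((Nat.sqrt n.toNat : Int) + 1) 1
def pvG (h mh e : Int) : Int := if h ≤ e * mh then e else 0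

lemma pvDivGen_fold (n : Int) (L : List Int) (acc : List Int × List Int) :
    L.foldl (fun acc i =>
      if PySem.Int.mod n i = 0 then
        (acc.1 ++ [i], if i * i ≠ n then acc.2 ++ [PySem.Int.floordiv n i] else acc.2)
      else acc) acc
    = (acc.1 ++ L.flatMap (pvSm n), acc.2 ++ L.flatMap (pvLg n)) := by
  induction L generalizing acc with
  | nil => simp
  | cons i L ih =>
    rw [List.foldl_cons, ih]
    by_cases h1 : PySem.Int.mod n i = 0
    · by_cases h2 : i * i = n <;>
        simp [h1, h2, pvSm, pvLg, List.append_assoc]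
    · simp [h1, pvSm, pvLg]

lemma pvDivGen_eq (n : Int) :
    pvDivGen n = (pvR n).flatMap (pvSm n) ++ ((pvR n).flatMap (pvLg n)).reverse := by
  simp only [pvDivGen, pvR]
  rw [pvDivGen_fold]
  simp

lemma pvsq_le_iff (h i : Int) (hh : 1 ≤ h) (hi : 1 ≤ i) :
    i * i ≤ h ↔ i ≤ (Nat.sqrt h.toNat : Int) := by
  have h0 : (h.toNat : Int) = h := Int.toNat_of_nonneg (by omega)
  have i0 : (i.toNat : Int) = i := Int.toNat_of_nonneg (by omega)
  have : i.toNat ≤ Nat.sqrt h.toNat ↔ i.toNat * i.toNat ≤ h.toNat := Nat.le_sqrt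
  zify [h0, i0] at this
  omega

lemma pvCof (h i : Int) (hh : 1 ≤ h) (hi : 1 ≤ i) (hd : i ∣ h) :
    1 ≤ h / i ∧ i * (h / i) = h ∧ h / (h / i) = i ∧ h / i ∣ h := by
  obtain ⟨q, hq⟩ := hd
  have hi0 : i ≠ 0 := by omega
  have hqe : h / i = q := by rw [hq]; exact Int.mul_ediv_cancel_left q hi0
  have hq1 : 1 ≤ q := by nlinarith
  refine ⟨by omega, by rw [hqe, ← hq], ?_, ⟨i, by rw [hqe, hq]; ring⟩⟩
  rw [hqe, hq, mul_comm]
  exact Int.mul_ediv_cancel_left i (by omega)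

lemma pvSm_mem (h e : Int) (hh : 1 ≤ h) (he : e ∈ (pvR h).flatMap (pvSm h)) :
    1 ≤ e ∧ e ∣ h ∧ e * e ≤ h := by
  obtain ⟨i, hiR, hie⟩ := List.mem_flatMap.mp he
  rw [pvR, PySem.List.mem_pyRange_one] at hiR
  unfold pvSm at hie
  by_cases hm : PySem.Int.mod h i = 0
  · simp [hm] at hie
    subst hie
    refine ⟨by omega, ?_, ?_⟩
    · exact (PySem.Int.mod_eq_zero_iff_dvd h e).mp hm
    · exact (pvsq_le_iff h e hh (by omega)).mpr (by omega)
  · simp [hm] at hie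

lemma pvLg_mem (h e : Int) (hh : 1 ≤ h) (he : e ∈ (pvR h).flatMap (pvLg h)) :
    1 ≤ e ∧ e ∣ h ∧ h < e * e := by
  obtain ⟨i, hiR, hie⟩ := List.mem_flatMap.mp he
  rw [pvR, PySem.List.mem_pyRange_one] at hiR
  unfold pvLg at hie
  by_cases hm : PySem.Int.mod h i = 0 ∧ i * i ≠ h
  · simp [hm] at hie
    have hd : i ∣ h := (PySem.Int.mod_eq_zero_iff_dvd h i).mp hm.1
    have hc := pvCof h i hh (by omega) hd
    have hsq : i * i ≤ h := (pvsq_le_iff h i hh (by omega)).mpr (by omega)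
    rw [PySem.Int.floordiv_eq_ediv_of_pos (by omega)] at hie
    subst hie
    refine ⟨hc.1, hc.2.2.2, ?_⟩
    -- i * i < h = i * (h/i) gives i < h/i, hence h = i*(h/i) < (h/i)*(h/i)
    have hlt : i * i < h := lt_of_le_of_ne hsq hm.2
    nlinarith [hc.2.1, hc.1]
  · simp [hm] at hie

lemma pvDivGen_complete (h e : Int) (hh : 1 ≤ h) (he : 1 ≤ e) (hd : e ∣ h) :
    e ∈ pvDivGen h := by
  rw [pvDivGen_eq, List.mem_append]
  by_cases hc : e * e ≤ h
  · left
    refine List.mem_flatMap.mpr ⟨e, ?_, ?_⟩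
    · rw [pvR, PySem.List.mem_pyRange_one]
      have := (pvsq_le_iff h e hh he).mp hc
      omega
    · simp [pvSm, (PySem.Int.mod_eq_zero_iff_dvd h e).mpr hd]
  · right
    rw [List.mem_reverse]
    have hc' := pvCof h e hh he hd
    set i := h / e with hie
    have hii : i * i ≤ h := by nlinarith [hc'.1, hc'.2.1]
    have hine : i * i ≠ h := by nlinarith [hc'.1, hc'.2.1]
    refine List.mem_flatMap.mpr ⟨i, ?_, ?_⟩
    · rw [pvR, PySem.List.mem_pyRange_one]
      have := (pvsq_le_iff h i hh hc'.1).mp hii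
      omega
    · have hdi : i ∣ h := hc'.2.2.2
      simp [pvLg, (PySem.Int.mod_eq_zero_iff_dvd h i).mpr hdi, hine,
        PySem.Int.floordiv_eq_ediv_of_pos (show (0:Int) < i by omega), hc'.2.2.1]

lemma pvSm_sublist (h : Int) (L : List Int) : (L.flatMap (pvSm h)).Sublist L := by
  induction L with
  | nil => simp
  | cons i L ih =>
    rw [List.flatMap_cons]
    unfold pvSm
    by_cases hm : PySem.Int.mod h i = 0
    · simpa [hm] using ih.cons_cons i
    · simpa [hm] using ih.cons i

lemma pvLg_eq_map (h : Int) (L : List Int) :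
    L.flatMap (pvLg h)
      = (L.filter (fun i => decide (PySem.Int.mod h i = 0 ∧ i * i ≠ h))).map
          (fun i => PySem.Int.floordiv h i) := by
  induction L with
  | nil => simp
  | cons i L ih =>
    rw [List.flatMap_cons, List.filter_cons, ih]
    by_cases hm : PySem.Int.mod h i = 0 ∧ i * i ≠ h <;> simp [pvLg, hm]

lemma pvDivGen_nodup (h : Int) (hh : 1 ≤ h) : (pvDivGen h).Nodup := by
  rw [pvDivGen_eq, List.nodup_append]
  have hR : (pvR h).Nodup := by rw [pvR]; exact PySem.List.nodup_pyRange_one _ _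
  refine ⟨(pvSm_sublist h (pvR h)).nodup hR, List.nodup_reverse.mpr ?_, ?_⟩
  · rw [pvLg_eq_map]
    refine List.Nodup.map_on ?_ (hR.filter _)
    intro x hx y hy hxy
    rw [List.mem_filter] at hx hy
    have hx1 : 1 ≤ x := by
      have := (PySem.List.mem_pyRange_one).mp (by rw [pvR] at hx; exact hx.1); omega
    have hy1 : 1 ≤ y := by
      have := (PySem.List.mem_pyRange_one).mp (by rw [pvR] at hy; exact hy.1); omega
    have hdx : x ∣ h := (PySem.Int.mod_eq_zero_iff_dvd h x).mp (by simpa using (of_decide_eq_true hx.2).1)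
    have hdy : y ∣ h := (PySem.Int.mod_eq_zero_iff_dvd h y).mp (by simpa using (of_decide_eq_true hy.2).1)
    rw [PySem.Int.floordiv_eq_ediv_of_pos (by omega : (0:Int) < x),
        PySem.Int.floordiv_eq_ediv_of_pos (by omega : (0:Int) < y)] at hxy
    have := (pvCof h x hh hx1 hdx).2.2.1
    have := (pvCof h y hh hy1 hdy).2.2.1
    calc x = h / (h / x) := ((pvCof h x hh hx1 hdx).2.2.1).symm
    _ = h / (h / y) := by rw [hxy]
    _ = y := (pvCof h y hh hy1 hdy).2.2.1
  · intro a ha b hb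
    rw [List.mem_reverse] at hb
    have h1 := pvSm_mem h a hh ha
    have h2 := pvLg_mem h b hh hb
    intro hab
    rw [hab] at h1
    omega

lemma pvSum_filter_eq_map (h mh : Int) (l : List Int) :
    (l.filter (fun e => decide (h ≤ e * mh))).sum = (l.map (pvG h mh)).sum := by
  induction l with
  | nil => simp
  | cons e l ih =>
    rw [List.filter_cons, List.map_cons, List.sum_cons, ← ih]
    by_cases hc : h ≤ e * mh <;> simp [pvG, hc]

lemma pvBody_eq (h mh i : Int) (hh : 1 ≤ h) (hi : 1 ≤ i) :
    (if h % i = 0 then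
       (if i * mh ≥ h then i else 0) +
       (if h / i ≠ i ∧ (h / i) * mh ≥ h then h / i else 0)
     else 0)
    = ((pvSm h i).map (pvG h mh)).sum + ((pvLg h i).map (pvG h mh)).sum := by
  have hmod : PySem.Int.mod h i = h % i := PySem.Int.mod_eq_emod_of_pos (by omega)
  have hfd : PySem.Int.floordiv h i = h / i := PySem.Int.floordiv_eq_ediv_of_pos (by omega)
  unfold pvSm pvLg pvG
  rw [hmod, hfd]
  by_cases hd : h % i = 0
  · have hdvd : i ∣ h := Int.dvd_of_emod_eq_zero hd
    have hc := pvCof h i hh hi hdvd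
    have hne : h / i ≠ i ↔ i * i ≠ h := by
      constructor
      · intro h1 h2
        exact h1 (by nlinarith [hc.2.1])
      · intro h1 h2
        exact h1 (by nlinarith [hc.2.1])
    by_cases h2 : i * i = h
    · have : h / i = i := by nlinarith [hc.2.1]
      simp [hd, h2, this, ge_iff_le, mul_comm]
    · have hnei : h / i ≠ i := hne.mpr h2
      simp [hd, h2, hnei, ge_iff_le, mul_comm]
  · simp [hd]

lemma pvSumDiv_char (h mh : Int) (hh : 1 ≤ h) (n : Nat) :
    ∀ (i : Int), 1 ≤ i → ((Nat.sqrt h.toNat : Int) + 1 - i).toNat ≤ n →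
    pvSumDiv h mh i =
      (((PySem.List.pyRange i ((Nat.sqrt h.toNat : Int) + 1) 1).flatMap (pvSm h)).map (pvG h mh)).sum
      + (((PySem.List.pyRange i ((Nat.sqrt h.toNat : Int) + 1) 1).flatMap (pvLg h)).map (pvG h mh)).sum := by
  induction n with
  | zero =>
    intro i hi hn
    have his : (Nat.sqrt h.toNat : Int) + 1 ≤ i := by omega
    have hc : ¬ i * i ≤ h := fun hc => by
      have := (pvsq_le_iff h i hh hi).mp hc; omega
    rw [pvSumDiv, dif_neg hc, PySem.List.pyRange_one_eq_nil his]
    simp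
  | succ n ih =>
    intro i hi hn
    by_cases hc : i * i ≤ h
    · have his : i < (Nat.sqrt h.toNat : Int) + 1 := by
        have := (pvsq_le_iff h i hh hi).mp hc; omega
      rw [pvSumDiv, dif_pos hc, PySem.List.pyRange_one_cons his]
      simp only [List.flatMap_cons, List.map_append, List.sum_append]
      rw [ih (i + 1) (by omega) (by omega), pvBody_eq h mh i hh hi]
      ring
    · have his : (Nat.sqrt h.toNat : Int) + 1 ≤ i := by
        by_contra hlt
        exact hc ((pvsq_le_iff h i hh hi).mpr (by omega))
      rw [pvSumDiv, dif_neg hc, PySem.List.pyRange_one_eq_nil his]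
      simp

lemma pvPresents_eq (h mh : Int) (hh : 1 ≤ h) :
    ((pvDivGen h).filter (fun e => decide (h ≤ e * mh))).sum = pvSumDiv h mh 1 := by
  rw [pvDivGen_eq, List.filter_append, List.sum_append,
      pvSum_filter_eq_map, pvSum_filter_eq_map, List.map_reverse, List.sum_reverse,
      pvSumDiv_char h mh hh ((Nat.sqrt h.toNat : Int) + 1 - 1).toNat 1 le_rfl le_rfl]
  rfl

lemma pvCond_iff (h mh e : Int) (hh : 1 ≤ h) (he : 1 ≤ e) (hd : e ∣ h) :
    (max 0 (min mh ((h - 1) / e)) < mh) ↔ h ≤ e * mh := by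
  have hq0 : 0 ≤ (h - 1) / e := Int.ediv_nonneg (by omega) (by omega)
  rcases le_or_gt mh 0 with hm | hm
  · constructor
    · intro hlt; omega
    · intro hle; nlinarith
  · have hbr : (h - 1) / e < mh ↔ h - 1 < mh * e := Int.ediv_lt_iff_lt_mul (by omega)
    constructor
    · intro hlt
      have : (h - 1) / e < mh := by omega
      have := hbr.mp this
      -- e ∣ h and h - 1 < mh * e give h ≤ e * mh
      obtain ⟨q, hq⟩ := hd
      have hq1 : 1 ≤ q := by nlinarith
      have : q ≤ mh := by nlinarith
      nlinarith
    · intro hle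
      have : h - 1 < mh * e := by nlinarith
      have := hbr.mpr this
      omega

lemma pvUpdate_inv (h mh e : Int) (hh : 1 ≤ h) (he : 1 ≤ e) :
    (if e ∣ h ∧ h ≤ e * mh then max 0 (min mh ((h - 1) / e)) + 1
     else max 0 (min mh ((h - 1) / e))) = max 0 (min mh (h / e)) := by
  have hdm := Int.mul_ediv_add_emod h e
  have hr0 : 0 ≤ h % e := Int.emod_nonneg h (by omega)
  have hre : h % e < e := Int.emod_lt_of_pos h (by omega)
  set q := h / e with hq
  by_cases hd : e ∣ h
  · have hr : h % e = 0 := Int.emod_eq_zero_of_dvd hd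
    have hq1 : 1 ≤ q := by nlinarith
    have hprev : (h - 1) / e = q - 1 := by
      have hm1 : e * (q - 1) = e * q - e := by ring
      have : h - 1 = (e - 1) + e * (q - 1) := by omega
      rw [this, Int.add_mul_ediv_left _ _ (by omega : e ≠ 0),
          Int.ediv_eq_zero_of_lt (by omega) (by omega)]
      ring
    have hcond : h ≤ e * mh ↔ q ≤ mh := by
      constructor <;> intro <;> nlinarith
    rw [hprev]
    by_cases hc : h ≤ e * mh
    · simp only [hd, hc, and_self, if_true]
      have : q ≤ mh := hcond.mp hc
      omega
    · simp only [hd, hc, and_false, if_false]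
      have : ¬ q ≤ mh := fun hx => hc (hcond.mpr hx)
      omega
  · have hr : 1 ≤ h % e := by
      rcases eq_or_lt_of_le hr0 with hz | hz
      · exact absurd (Int.dvd_of_emod_eq_zero hz.symm) hd
      · omega
    have hprev : (h - 1) / e = q := by
      have : h - 1 = (h % e - 1) + e * q := by omega
      rw [this, Int.add_mul_ediv_left _ _ (by omega : e ≠ 0),
          Int.ediv_eq_zero_of_lt (by omega) (by omega)]
      ring
    simp [hd, hprev]

lemma pvElf_fold (h mh : Int) :
    ∀ (es : List Int) (vc vis : List Int),
      es.Nodup →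
      (∀ e ∈ es, 1 ≤ e ∧ e.toNat < vc.length) →
      (∀ e ∈ es, (vc.getD e.toNat 0 < mh) ↔ h ≤ e * mh) →
      (es.foldl (pvElfStep mh) (vc, vis)).2 = vis ++ es.filter (fun e => decide (h ≤ e * mh)) ∧
      (es.foldl (pvElfStep mh) (vc, vis)).1.length = vc.length ∧
      ∀ k : Nat, (es.foldl (pvElfStep mh) (vc, vis)).1.getD k 0 =
        if (k : Int) ∈ es ∧ h ≤ (k : Int) * mh then vc.getD k 0 + 1 else vc.getD k 0 := by
  intro es
  induction es with
  | nil => intro vc vis _ _ _; simp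
  | cons e es ih =>
    intro vc vis hnd hbd hiv
    have hein : e ∈ e :: es := List.mem_cons_self
    obtain ⟨he1, helt⟩ := hbd e hein
    have hiff := hiv e hein
    have henotin : e ∉ es := (List.nodup_cons.mp hnd).1
    rw [List.foldl_cons]
    by_cases hc : vc.getD e.toNat 0 < mh
    · have hstep : pvElfStep mh (vc, vis) e
          = (vc.set e.toNat (vc.getD e.toNat 0 + 1), vis ++ [e]) := by
        unfold pvElfStep; rw [if_pos hc]
      rw [hstep]
      have hpres : ∀ e' ∈ es, (vc.set e.toNat (vc.getD e.toNat 0 + 1)).getD e'.toNat 0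
          = vc.getD e'.toNat 0 := by
        intro e' he'
        have he'1 : 1 ≤ e' := (hbd e' (List.mem_cons_of_mem _ he')).1
        have hne : e' ≠ e := fun hEq => henotin (hEq ▸ he')
        have hnn : e.toNat ≠ e'.toNat := by omega
        rw [List.getD_eq_getElem?_getD, List.getElem?_set_ne hnn, ← List.getD_eq_getElem?_getD]
      obtain ⟨H2, Hlen, Hpt⟩ := ih (vc.set e.toNat (vc.getD e.toNat 0 + 1)) (vis ++ [e])
        (List.nodup_cons.mp hnd).2
        (fun e' he' => by
          have := hbd e' (List.mem_cons_of_mem _ he')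
          simpa [List.length_set] using this)
        (fun e' he' => by rw [hpres e' he']; exact hiv e' (List.mem_cons_of_mem _ he'))
      refine ⟨?_, ?_, ?_⟩
      · rw [H2, List.filter_cons_of_pos (by simpa using hiff.mp hc), List.append_assoc]
        rfl
      · rw [Hlen, List.length_set]
      · intro k
        rw [Hpt k]
        by_cases hk : (k : Int) = e
        · have hkn : k = e.toNat := by omega
          have hknotin : (k : Int) ∉ es := by rw [hk]; exact henotin
          rw [if_neg (by tauto)]
          rw [if_pos ⟨by rw [hk]; exact hein, by rw [hk]; exact hiff.mp hc⟩]
          rw [hkn, List.getD_eq_getElem?_getD, List.getElem?_set_self helt]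
          rfl
        · have hget : (vc.set e.toNat (vc.getD e.toNat 0 + 1)).getD k 0 = vc.getD k 0 := by
            rw [List.getD_eq_getElem?_getD, List.getElem?_set_ne (by omega), ← List.getD_eq_getElem?_getD]
          by_cases hks : (k : Int) ∈ es ∧ h ≤ (k : Int) * mh
          · rw [if_pos hks, if_pos ⟨List.mem_cons_of_mem _ hks.1, hks.2⟩, hget]
          · rw [if_neg hks, if_neg (by rw [List.mem_cons]; tauto), hget]
    · have hstep : pvElfStep mh (vc, vis) e = (vc, vis) := by
        unfold pvElfStep; rw [if_neg hc]
      rw [hstep]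
      have hcf : ¬ h ≤ e * mh := fun hx => hc (hiff.mpr hx)
      obtain ⟨H2, Hlen, Hpt⟩ := ih vc vis (List.nodup_cons.mp hnd).2
        (fun e' he' => hbd e' (List.mem_cons_of_mem _ he'))
        (fun e' he' => hiv e' (List.mem_cons_of_mem _ he'))
      refine ⟨?_, Hlen, ?_⟩
      · rw [H2, List.filter_cons_of_neg (by simpa using hcf)]
      · intro k
        rw [Hpt k]
        by_cases hk : (k : Int) = e
        · rw [if_neg (fun hx => hcf (hk ▸ hx.2)), if_neg (fun hx => hcf (hk ▸ hx.2))]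
        · by_cases hks : (k : Int) ∈ es ∧ h ≤ (k : Int) * mh
          · rw [if_pos hks, if_pos ⟨List.mem_cons_of_mem _ hks.1, hks.2⟩]
          · rw [if_neg hks, if_neg (by rw [List.mem_cons]; tauto)]

lemma pvDivGen_mem (h e : Int) (hh : 1 ≤ h) (he : e ∈ pvDivGen h) : 1 ≤ e ∧ e ∣ h := by
  rw [pvDivGen_eq, List.mem_append] at he
  rcases he with he | he
  · have := pvSm_mem h e hh he
    exact ⟨this.1, this.2.1⟩
  · rw [List.mem_reverse] at he
    have := pvLg_mem h e hh he
    exact ⟨this.1, this.2.1⟩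

lemma pvSum_map_mul11 (l : List Int) : (l.map (fun i => i * 11)).sum = l.sum * 11 := by
  induction l with
  | nil => simp
  | cons x l ih => simp [ih]; ring

lemma pvLoop_eq (high mh : Int) :
    ∀ (fuel : Nat) (hs : Int) (vc : List Int),
      0 ≤ hs → vc.length = hs.toNat + 1 →
      (∀ e : Int, 1 ≤ e → e ≤ hs → vc.getD e.toNat 0 = max 0 (min mh (hs / e))) →
      pvLoopA high mh fuel hs vc = pvLoopB high mh fuel hs := by
  intro fuel
  induction fuel with
  | zero => intro hs vc _ _ _; rfl
  | succ fuel ih =>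
    intro hs vc hhs hlen hinv
    have hinv' : ∀ e : Int, 1 ≤ e → e ≤ hs + 1 →
        (vc ++ [0]).getD e.toNat 0 = max 0 (min mh ((hs + 1 - 1) / e)) := by
      intro e he1 hele
      rcases lt_or_ge hs e with hgt | hle
      · -- e = hs + 1, the freshly appended slot
        have hee : e = hs + 1 := by omega
        have hidx : e.toNat = vc.length := by omega
        have hz : hs / e = 0 := Int.ediv_eq_zero_of_lt (by omega) (by omega)
        have hz' : (hs + 1 - 1) / e = 0 := by rw [show hs + 1 - 1 = hs by omega, hz]
        rw [List.getD_eq_getElem?_getD, hidx, List.getElem?_append_right le_rfl]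
        rw [hz']
        simp
      · have hidx : e.toNat < vc.length := by omega
        rw [List.getD_eq_getElem?_getD, List.getElem?_append_left hidx,
            ← List.getD_eq_getElem?_getD]
        have : hs + 1 - 1 = hs := by omega
        rw [this]
        exact hinv e he1 hle
    have hfacts : ∀ e ∈ pvDivGen (hs + 1),
        1 ≤ e ∧ e.toNat < (vc ++ [0]).length := by
      intro e hmem
      have hf := pvDivGen_mem (hs + 1) e (by omega) hmem
      have := Int.le_of_dvd (by omega) hf.2
      refine ⟨hf.1, ?_⟩
      simp only [List.length_append, List.length_cons, List.length_nil]
      omega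
    have hiv : ∀ e ∈ pvDivGen (hs + 1),
        ((vc ++ [0]).getD e.toNat 0 < mh) ↔ hs + 1 ≤ e * mh := by
      intro e hmem
      have hf := pvDivGen_mem (hs + 1) e (by omega) hmem
      have := Int.le_of_dvd (by omega) hf.2
      rw [hinv' e hf.1 (by omega)]
      exact pvCond_iff (hs + 1) mh e (by omega) hf.1 hf.2
    obtain ⟨H2, Hlen, Hpt⟩ := pvElf_fold (hs + 1) mh (pvDivGen (hs + 1)) (vc ++ [0]) []
      (pvDivGen_nodup (hs + 1) (by omega)) hfacts hiv
    rw [pvLoopA, pvLoopB]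
    have hpres :
        (((pvDivGen (hs + 1)).foldl (pvElfStep mh) (vc ++ [0], [])).2.map (fun i => i * 11)).sum
          = 11 * pvSumDiv (hs + 1) mh 1 := by
      rw [H2, List.nil_append, pvSum_map_mul11, pvPresents_eq (hs + 1) mh (by omega)]
      ring
    rw [hpres]
    by_cases hgt : 11 * pvSumDiv (hs + 1) mh 1 > high
    · rw [if_pos hgt, if_pos hgt]
    · rw [if_neg hgt, if_neg hgt]
      apply ih (hs + 1)
      · omega
      · rw [Hlen]
        simp only [List.length_append, List.length_cons, List.length_nil]
        omega
      · intro e he1 hele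
        have hcast : ((e.toNat : Nat) : Int) = e := Int.toNat_of_nonneg (by omega)
        have hup := pvUpdate_inv (hs + 1) mh e (by omega) he1
        rw [Hpt e.toNat, hcast]
        by_cases hcnd : e ∣ (hs + 1) ∧ hs + 1 ≤ e * mh
        · rw [if_pos ⟨pvDivGen_complete (hs + 1) e (by omega) he1 hcnd.1, hcnd.2⟩,
              hinv' e he1 hele, ← hup, if_pos hcnd]
        · rw [if_neg (fun hx => hcnd ⟨(pvDivGen_mem (hs + 1) e (by omega) hx.1).2, hx.2⟩),
              hinv' e he1 hele, ← hup, if_neg hcnd]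

-- ===== VERDICT (by name: the statement is the Claim_ definition above) =====
theorem part_2_spec : Claim_equal_part_2 := by
  intro high mh _
  unfold Spec_part_2 part_2 part_2_alt
  exact pvLoop_eq high mh (high.toNat + 2) 0 [0] le_rfl (by simp)
    (fun e he1 he0 => absurd (le_trans he1 he0) (by norm_num))
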